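-- pv_equiv track=rewrite | github.com/tpguarnieri/advent_of_code_2025 | day_1/day_1.py | count_zero_rotations
-- ===== SOURCE A (Python) =====
-- def count_zero_rotations(rotations):
--     result = 0
--     number = 50
--     for rotation in rotations:
--
--        # Apply rotation
--         number = (number + rotation) % 100
--
--         # Count the zeroes
--         if number == 0:
--             result += 1
--
--     return result
-- ===== SOURCE B (Python) =====
-- def count_zero_rotations(rotations):
--     # Divide and conquer: zeros in a segment = zeros in its left half (same
--     # starting offset) + zeros in its right half (offset advanced by the left
--     # half's total rotation).  The dial reads zero after a step exactly when
--     # the running offset is divisible by 100.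
--     def go(seg, off):
--         n = len(seg)
--         if n == 0:
--             return 0
--         if n == 1:
--             return 1 if (off + seg[0]) % 100 == 0 else 0
--         mid = n // 2
--         left = seg[:mid]
--         return go(left, off) + go(seg[mid:], off + sum(left))
--     return go(rotations, 50)
-- ===== Notes on version B (the rewrite author's own statement) =====
-- stated objective: alternative
-- what changed: B replaces A's sequential mod-100 dial scan with a divide-and-conquer recursion: it splits the list in half, counts zeros in the left half and, with the offset advanced by the left half's sum, in the right half, testing divisibility of the raw offset by 100 instead of maintaining a bounded rotating state.
import Mathlib
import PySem

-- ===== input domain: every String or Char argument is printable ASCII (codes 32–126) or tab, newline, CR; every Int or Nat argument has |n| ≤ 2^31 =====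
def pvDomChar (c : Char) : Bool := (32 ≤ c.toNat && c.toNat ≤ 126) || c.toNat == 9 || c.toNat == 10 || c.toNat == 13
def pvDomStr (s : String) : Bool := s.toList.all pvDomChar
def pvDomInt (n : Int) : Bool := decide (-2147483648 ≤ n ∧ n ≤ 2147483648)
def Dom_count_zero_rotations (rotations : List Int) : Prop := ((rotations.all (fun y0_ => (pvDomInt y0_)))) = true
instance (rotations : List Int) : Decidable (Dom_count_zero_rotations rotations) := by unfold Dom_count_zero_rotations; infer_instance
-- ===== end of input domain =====

-- B replaces A's sequential mod-100 dial scan by a divide-and-conquer recursion over list halves; objective: alternative decomposition.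


-- ===== PORT A =====
-- state (result, number); number = (number + rotation) % 100 each step, count zeros
def count_zero_rotations (rotations : List Int) : Int :=
  (rotations.foldl
    (fun (st : Int × Int) rotation =>
      let number := PySem.Int.mod (st.2 + rotation) 100
      (if number = 0 then st.1 + 1 else st.1, number))
    (0, 50)).1

-- ===== PORT B =====
-- go(seg, off): split seg at mid = n//2, recurse left with off, right with off + sum(left)
def pvGoB (seg : List Int) (off : Int) : Int :=
  let n := seg.length
  if n = 0 then 0
  else if n = 1 then (if PySem.Int.mod (off + seg.headI) 100 = 0 then 1 else 0)
  else
    let mid := n / 2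
    let left := PySem.List.slice seg none (some (mid : Int))
    pvGoB left off + pvGoB (PySem.List.slice seg (some (mid : Int)) none) (off + left.sum)
termination_by seg.length
decreasing_by
  · rw [PySem.List.slice_to_natCast]; simp; omega
  · rw [PySem.List.slice_from_natCast]; simp; omega

def count_zero_rotations_alt (rotations : List Int) : Int :=
  pvGoB rotations 50

-- ===== PRECONDITION & SPEC =====
def Spec_count_zero_rotations (rotations : List Int) (out : Int) : Prop := out = count_zero_rotations_alt rotations
instance (rotations : List Int) (out : Int) : Decidable (Spec_count_zero_rotations rotations out) := by unfold Spec_count_zero_rotations; infer_instance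

-- ===== CLAIM (what is proved, stated in full; the proofs are below) =====
def Claim_equal_count_zero_rotations : Prop := ∀ (rotations : List Int), Dom_count_zero_rotations rotations → Spec_count_zero_rotations rotations (count_zero_rotations rotations)

-- ===== LEMMAS AND PROOFS =====

-- reference count: number of nonempty prefixes p of l with (t + sum p) % 100 == 0
def pvCnt (t : Int) : List Int → Int
  | [] => 0
  | r :: l => (if PySem.Int.mod (t + r) 100 = 0 then 1 else 0) + pvCnt (t + r) l

lemma pvCnt_append (l₁ l₂ : List Int) (t : Int) :
    pvCnt t (l₁ ++ l₂) = pvCnt t l₁ + pvCnt (t + l₁.sum) l₂ := by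
  induction l₁ generalizing t with
  | nil => simp [pvCnt]
  | cons r l ih =>
    simp only [List.cons_append, pvCnt, ih, List.sum_cons]
    rw [show t + (r + l.sum) = t + r + l.sum from by ring]
    ring

lemma pv_mod_shift (t r : Int) :
    PySem.Int.mod (PySem.Int.mod t 100 + r) 100 = PySem.Int.mod (t + r) 100 := by
  simp only [PySem.Int.mod_eq_emod_of_pos (show (0:Int) < 100 by norm_num)]
  rw [Int.add_emod, Int.add_emod t r, Int.emod_emod_of_dvd _ dvd_rfl]

lemma pvA_fold (l : List Int) (res t : Int) :
    (l.foldl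
      (fun (st : Int × Int) rotation =>
        let number := PySem.Int.mod (st.2 + rotation) 100
        (if number = 0 then st.1 + 1 else st.1, number))
      (res, PySem.Int.mod t 100)).1 = res + pvCnt t l := by
  induction l generalizing res t with
  | nil => simp [pvCnt]
  | cons r l ih =>
    simp only [List.foldl, pvCnt, pv_mod_shift]
    rw [ih (if PySem.Int.mod (t + r) 100 = 0 then res + 1 else res) (t + r)]
    split_ifs <;> ring

lemma pvGoB_eq_cnt (n : Nat) (seg : List Int) (hn : seg.length ≤ n) (off : Int) :
    pvGoB seg off = pvCnt off seg := by
  induction n generalizing seg off with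
  | zero =>
    have : seg = [] := List.length_eq_zero_iff.mp (Nat.le_zero.mp hn)
    subst this; simp [pvGoB, pvCnt]
  | succ n ih =>
    rw [pvGoB]
    by_cases h0 : seg.length = 0
    · have : seg = [] := List.length_eq_zero_iff.mp h0
      subst this; simp [pvCnt]
    · by_cases h1 : seg.length = 1
      · obtain ⟨r, hr⟩ := List.length_eq_one_iff.mp h1
        subst hr; simp [pvCnt]
      · simp only [h0, h1, if_false]
        have h2 : 2 ≤ seg.length := by omega
        have hmid : seg.length / 2 < seg.length := by omega
        have hmid1 : 1 ≤ seg.length / 2 := by omega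
        rw [PySem.List.slice_to_natCast, PySem.List.slice_from_natCast]
        rw [ih _ (by simp; omega), ih _ (by simp; omega)]
        conv_rhs => rw [← List.take_append_drop (seg.length / 2) seg]
        rw [pvCnt_append]

-- ===== VERDICT (by name: the statement is the Claim_ definition above) =====
theorem count_zero_rotations_spec : Claim_equal_count_zero_rotations := by
  intro rotations _
  have hA := pvA_fold rotations 0 50
  simp only [show PySem.Int.mod (50:Int) 100 = (50:Int) from by decide] at hA
  unfold Spec_count_zero_rotations count_zero_rotations count_zero_rotations_alt
  rw [hA, pvGoB_eq_cnt rotations.length rotations le_rfl]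
  ring
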